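-- pv_equiv track=rewrite | github.com/phamminhanhdhbk/Basic-Python-2023-100-example- | Thang 5/Exercise 8 Nhập vào một list số nguyên L, hãy đưa các số chẵn trong list về đầu list, số lẻ về cuối list và các phần tử 0 nằm ở giữa/index.py | rearrange_list
-- ===== SOURCE A (Python) =====
-- def rearrange_list(L):
--     evens = []  # List to store even numbers
--     odds = []  # List to store odd numbers
--     zeros = []  # List to store zeros
--
--     for num in L:
--         if num == 0:
--             zeros.append(num)
--         elif num % 2 == 0:
--             evens.append(num)
--         else:
--             odds.append(num)
--
--     return evens + zeros + odds
-- ===== SOURCE B (Python) =====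
-- def rearrange_list(L):
--     return sorted(L, key=lambda x: 1 if x == 0 else (0 if x % 2 == 0 else 2))
-- ===== Notes on version B (the rewrite author's own statement) =====
-- stated objective: idiomatic
-- what changed: Replaces the three accumulator lists and explicit loop with a single stable sort by a 3-valued rank key (evens 0, zeros 1, odds 2).
import Mathlib
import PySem

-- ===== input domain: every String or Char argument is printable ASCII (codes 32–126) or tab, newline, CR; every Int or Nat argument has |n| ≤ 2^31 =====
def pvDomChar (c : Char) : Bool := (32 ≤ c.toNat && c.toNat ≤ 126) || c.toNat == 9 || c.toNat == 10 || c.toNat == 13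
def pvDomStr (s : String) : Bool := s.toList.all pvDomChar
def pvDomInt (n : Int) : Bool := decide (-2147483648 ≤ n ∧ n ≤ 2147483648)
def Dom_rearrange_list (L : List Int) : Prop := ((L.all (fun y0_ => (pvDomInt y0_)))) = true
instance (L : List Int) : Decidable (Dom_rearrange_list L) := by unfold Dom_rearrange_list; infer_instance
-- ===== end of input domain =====

-- B replaces A's three accumulator lists and explicit loop with one stable sort by a 3-valued rank key (idiomatic).


-- ===== PORT A =====
def rearrange_list (L : List Int) : List Int :=
  let acc := L.foldl (fun (acc : List Int × List Int × List Int) num =>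
    let (evens, zeros, odds) := acc
    if num = 0 then (evens, zeros ++ [num], odds)
    else if PySem.Int.mod num 2 = 0 then (evens ++ [num], zeros, odds)
    else (evens, zeros, odds ++ [num])) ([], [], [])
  acc.1 ++ acc.2.1 ++ acc.2.2

-- ===== PORT B =====
-- the sort key: 1 for zero, 0 for other evens, 2 for odds
def pvRank (x : Int) : Int :=
  if x = 0 then 1 else if PySem.Int.mod x 2 = 0 then 0 else 2

def rearrange_list_alt (L : List Int) : List Int :=
  PySem.List.sorted L pvRank false

-- ===== PRECONDITION & SPEC =====
def Spec_rearrange_list (L : List Int) (out : List Int) : Prop := out = rearrange_list_alt L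
instance (L : List Int) (out : List Int) : Decidable (Spec_rearrange_list L out) := by unfold Spec_rearrange_list; infer_instance

-- ===== CLAIM (what is proved, stated in full; the proofs are below) =====
def Claim_equal_rearrange_list : Prop := ∀ (L : List Int), Dom_rearrange_list L → Spec_rearrange_list L (rearrange_list L)

-- ===== LEMMAS AND PROOFS =====

-- A's loop accumulates exactly the three rank-filters of L, in order
theorem pvLoopA (L : List Int) (e z o : List Int) :
    L.foldl (fun (acc : List Int × List Int × List Int) num =>
      let (evens, zeros, odds) := acc
      if num = 0 then (evens, zeros ++ [num], odds)
      else if PySem.Int.mod num 2 = 0 then (evens ++ [num], zeros, odds)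
      else (evens, zeros, odds ++ [num])) (e, z, o)
    = (e ++ L.filter (fun y => pvRank y = 0),
       z ++ L.filter (fun y => pvRank y = 1),
       o ++ L.filter (fun y => pvRank y = 2)) := by
  induction L generalizing e z o with
  | nil => simp
  | cons x xs ih =>
    by_cases h0 : x = 0
    · simp only [List.foldl_cons, if_pos h0]
      rw [ih]
      subst h0
      simp [pvRank]
    · by_cases h2 : PySem.Int.mod x 2 = 0
      · have hm : x % 2 = 0 := by
          have h := PySem.Int.mod_eq_emod_of_pos (a := x) (b := 2) (by norm_num)
          omega
        have hd : (2:Int) ∣ x := by omega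
        simp only [List.foldl_cons, if_neg h0, if_pos h2]
        rw [ih]
        simp [pvRank, h0, hd]
      · have hm : x % 2 = 1 := by
          have h := PySem.Int.mod_eq_emod_of_pos (a := x) (b := 2) (by norm_num)
          omega
        have hd : ¬ (2:Int) ∣ x := by omega
        simp only [List.foldl_cons, if_neg h0, if_neg h2]
        rw [ih]
        simp [pvRank, h0, hd]

theorem pvInsertBy_skip {α : Type} (before : α → α → Bool) (x : α) (as bs : List α)
    (h : ∀ a ∈ as, before x a = false) :
    PySem.List.insertBy before x (as ++ bs) = as ++ PySem.List.insertBy before x bs := by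
  induction as with
  | nil => simp
  | cons a as ih =>
    have ha : before x a = false := h a (by simp)
    simp [PySem.List.insertBy, ha, ih (fun a ha' => h a (by simp [ha']))]

theorem pvInsertBy_front {α : Type} (before : α → α → Bool) (x : α) (ys : List α)
    (h : ∀ y ∈ ys, before x y = true) :
    PySem.List.insertBy before x ys = x :: ys := by
  cases ys with
  | nil => simp [PySem.List.insertBy]
  | cons y ys => simp [PySem.List.insertBy, h y (by simp)]

theorem pvRank_cases (x : Int) : pvRank x = 0 ∨ pvRank x = 1 ∨ pvRank x = 2 := by
  unfold pvRank; split_ifs <;> simp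

-- the stable sort by rank is exactly the three rank-filters concatenated
theorem pvSorted_filters (L : List Int) :
    PySem.List.sorted L pvRank false
    = L.filter (fun y => pvRank y = 0) ++ L.filter (fun y => pvRank y = 1)
      ++ L.filter (fun y => pvRank y = 2) := by
  induction L using List.reverseRecOn with
  | nil => simp [PySem.List.sorted]
  | append_singleton xs x ih =>
    have hstep : PySem.List.sorted (xs ++ [x]) pvRank false
        = PySem.List.insertBy (fun a b => decide (pvRank a < pvRank b)) x
            (PySem.List.sorted xs pvRank false) := by
      simp [PySem.List.sorted, List.foldl_append]
    rw [hstep, ih]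
    have hf0 : ∀ a ∈ xs.filter (fun y => pvRank y = 0), pvRank a = 0 := by
      intro a ha; simpa using (List.mem_filter.mp ha).2
    have hf1 : ∀ a ∈ xs.filter (fun y => pvRank y = 1), pvRank a = 1 := by
      intro a ha; simpa using (List.mem_filter.mp ha).2
    have hf2 : ∀ a ∈ xs.filter (fun y => pvRank y = 2), pvRank a = 2 := by
      intro a ha; simpa using (List.mem_filter.mp ha).2
    rcases pvRank_cases x with hx | hx | hx
    · -- rank 0: skip nothing, goes right after the rank-0 block
      rw [List.append_assoc,
        pvInsertBy_skip _ x _ _ (by intro a ha; simp [hx, hf0 a ha]),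
        pvInsertBy_front _ x _ (by
          intro y hy
          rcases List.mem_append.mp hy with hy | hy
          · simp [hx, hf1 y hy]
          · simp [hx, hf2 y hy])]
      simp [List.filter_append, hx]
    · -- rank 1: skip rank-0 and rank-1 blocks, front of rank-2 block
      rw [List.append_assoc,
        pvInsertBy_skip _ x _ _ (by intro a ha; simp [hx, hf0 a ha]),
        pvInsertBy_skip _ x _ _ (by intro a ha; simp [hx, hf1 a ha]),
        pvInsertBy_front _ x _ (by intro y hy; simp [hx, hf2 y hy])]
      simp [List.filter_append, hx]
    · -- rank 2: goes at the very end
      rw [PySem.List.insertBy_of_forall_not_before _ x _ (by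
        intro y hy
        rcases List.mem_append.mp hy with hy | hy
        · rcases List.mem_append.mp hy with hy | hy
          · simp [hx, hf0 y hy]
          · simp [hx, hf1 y hy]
        · simp [hx, hf2 y hy])]
      simp [List.filter_append, hx]

-- ===== VERDICT (by name: the statement is the Claim_ definition above) =====
theorem rearrange_list_spec : Claim_equal_rearrange_list := by
  intro L _
  unfold Spec_rearrange_list rearrange_list rearrange_list_alt
  rw [pvLoopA L [] [] [], pvSorted_filters]
  simp
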